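-- pv_equiv track=rewrite | github.com/Ashutosh-1001/bill-api | app.py | cluster_tokens_to_rows
-- ===== SOURCE A (Python) =====
-- from typing import List, Tuple
--
-- def cluster_tokens_to_rows(tokens: List[dict], y_thresh: int = 12) -> List[List[dict]]:
--     if not tokens:
--         return []
--     tokens_sorted = sorted(tokens, key=lambda t: t['cy'])
--     rows = []
--     current = [tokens_sorted[0]]
--     for tok in tokens_sorted[1:]:
--         if abs(tok['cy'] - current[-1]['cy']) <= y_thresh:
--             current.append(tok)
--         else:
--             # sort row left-to-right
--             rows.append(sorted(current, key=lambda t: t['cx']))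
--             current = [tok]
--     rows.append(sorted(current, key=lambda t: t['cx']))
--     return rows
-- ===== SOURCE B (Python) =====
-- def cluster_tokens_to_rows(tokens, y_thresh=12):
--     if not tokens:
--         return []
--     ts = sorted(tokens, key=lambda t: t['cy'])
--     labels = []
--     g = 0
--     prev = None
--     for tok in ts:
--         if prev is not None and abs(tok['cy'] - prev['cy']) > y_thresh:
--             g += 1
--         labels.append(g)
--         prev = tok
--     pairs = list(zip(labels, ts))
--     return [sorted([t for l2, t in pairs if l2 == lab], key=lambda t: t['cx'])
--             for lab in range(g + 1)]
-- ===== Notes on version B (the rewrite author's own statement) =====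
-- stated objective: alternative
-- what changed: A grows a running 'current' row and flushes it at each gap; B labels each cy-sorted token with a group number in one pass and then builds each row by selecting its label, so no row accumulator or flush logic exists.
-- outside the precondition, e.g. on cluster_tokens_to_rows([{'cx': 1}], 12): A raises KeyError, B raises KeyError
import Mathlib
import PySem

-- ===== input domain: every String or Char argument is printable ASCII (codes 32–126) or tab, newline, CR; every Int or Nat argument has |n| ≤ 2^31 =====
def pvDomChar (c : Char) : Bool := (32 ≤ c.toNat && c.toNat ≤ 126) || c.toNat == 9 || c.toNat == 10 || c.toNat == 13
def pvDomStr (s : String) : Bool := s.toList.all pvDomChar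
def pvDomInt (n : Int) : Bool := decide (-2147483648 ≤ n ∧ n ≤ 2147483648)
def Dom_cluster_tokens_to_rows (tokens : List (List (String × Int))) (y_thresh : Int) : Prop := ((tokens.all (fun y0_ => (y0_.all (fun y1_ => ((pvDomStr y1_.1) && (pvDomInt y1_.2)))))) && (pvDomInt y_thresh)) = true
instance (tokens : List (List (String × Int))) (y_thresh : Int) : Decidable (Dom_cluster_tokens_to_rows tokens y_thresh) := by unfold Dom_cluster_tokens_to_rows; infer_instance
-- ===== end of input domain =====

-- B replaces A's running-row accumulator by a relabel-then-select decomposition: label each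
-- sorted token with a group number in one pass, then build each row by selecting its label
-- (objective: alternative decomposition, not claimed faster).

-- shared helpers: the Python dict lookups t['cy'] / t['cx'] (token dicts are association
-- lists; lookup = first match, total under Pre_, which guarantees the key is present)
def pvTokGet (t : List (String × Int)) (k : String) : Int := PySem.Dict.getD ⟨t⟩ k 0
def pvCy (t : List (String × Int)) : Int := pvTokGet t "cy"
def pvCx (t : List (String × Int)) : Int := pvTokGet t "cx"
-- sorted(row, key=lambda t: t['cx'])
def pvSortCx (row : List (List (String × Int))) : List (List (String × Int)) :=
  PySem.List.sorted row pvCx false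

-- ===== PORT A =====
def cluster_tokens_to_rows (tokens : List (List (String × Int))) (y_thresh : Int) : List (List (List (String × Int))) :=
  if tokens = [] then []
  else
    let tokens_sorted := PySem.List.sorted tokens pvCy false
    let st := (PySem.List.slice tokens_sorted (some 1) none).foldl
      (fun (acc : List (List (List (String × Int))) × List (List (String × Int))) tok =>
        if |pvCy tok - pvCy (PySem.List.pyGetD acc.2 (-1) [])| ≤ y_thresh then
          (acc.1, acc.2 ++ [tok])
        else
          (acc.1 ++ [pvSortCx acc.2], [tok]))
      ([], [PySem.List.pyGetD tokens_sorted 0 []])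
    st.1 ++ [pvSortCx st.2]

-- B's loop body (the if/append step of the labelling pass)
def pvStepB (y : Int) (st : Int × List Int × Option (List (String × Int)))
    (tok : List (String × Int)) : Int × List Int × Option (List (String × Int)) :=
  let g := match st.2.2 with
    | some prev => if y < |pvCy tok - pvCy prev| then st.1 + 1 else st.1
    | none => st.1
  (g, st.2.1 ++ [g], some tok)

-- ===== PORT B =====
def cluster_tokens_to_rows_alt (tokens : List (List (String × Int))) (y_thresh : Int) : List (List (List (String × Int))) :=
  if tokens = [] then []
  else
    let ts := PySem.List.sorted tokens pvCy false
    -- one pass: group label g, the labels list, and the previous token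
    let st := ts.foldl (pvStepB y_thresh) (0, [], none)
    let pairs := st.2.1.zip ts
    (PySem.List.pyRange 0 (st.1 + 1) 1).map
      (fun lab => pvSortCx ((pairs.filter (fun p => p.1 == lab)).map (fun p => p.2)))

-- ===== PRECONDITION & SPEC =====
-- Pre_ excludes exactly the inputs where Python A raises KeyError: some token lacks key 'cy' or 'cx'.
def Pre_cluster_tokens_to_rows (tokens : List (List (String × Int))) (y_thresh : Int) : Prop :=
  (tokens.all (fun t => PySem.Dict.contains (⟨t⟩ : PySem.Dict String Int) "cy" &&
                        PySem.Dict.contains (⟨t⟩ : PySem.Dict String Int) "cx")) = true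
instance (tokens : List (List (String × Int))) (y_thresh : Int) : Decidable (Pre_cluster_tokens_to_rows tokens y_thresh) := by unfold Pre_cluster_tokens_to_rows; infer_instance
def pvWitness_cluster_tokens_to_rows : (List (List (String × Int))) × Int :=
  ([[("cy", 5), ("cx", 1)], [("cy", 30), ("cx", 0)], [("cy", 7), ("cx", 2)]], 12)

def Spec_cluster_tokens_to_rows (tokens : List (List (String × Int))) (y_thresh : Int) (out : List (List (List (String × Int)))) : Prop := out = cluster_tokens_to_rows_alt tokens y_thresh
instance (tokens : List (List (String × Int))) (y_thresh : Int) (out : List (List (List (String × Int)))) : Decidable (Spec_cluster_tokens_to_rows tokens y_thresh out) := by unfold Spec_cluster_tokens_to_rows; infer_instance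

-- ===== CLAIM (what is proved, stated in full; the proofs are below) =====
def Claim_equal_cluster_tokens_to_rows : Prop := ∀ (tokens : List (List (String × Int))) (y_thresh : Int), Dom_cluster_tokens_to_rows tokens y_thresh → Pre_cluster_tokens_to_rows tokens y_thresh → Spec_cluster_tokens_to_rows tokens y_thresh (cluster_tokens_to_rows tokens y_thresh)

-- ===== LEMMAS AND PROOFS =====

-- the common abstraction: split the cy-sorted stream into maximal runs of consecutive
-- tokens whose cy-gap to the previous token is ≤ y
def pvRunsGo (y : Int) (prev : List (String × Int)) (cur : List (List (String × Int))) :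
    List (List (String × Int)) → List (List (List (String × Int)))
  | [] => [cur]
  | t :: rest =>
      if |pvCy t - pvCy prev| ≤ y then pvRunsGo y t (cur ++ [t]) rest
      else cur :: pvRunsGo y t [t] rest

-- B's labels, written structurally
def pvLabelsOf (y g : Int) (prev : List (String × Int)) : List (List (String × Int)) → List Int
  | [] => []
  | t :: rest =>
      if y < |pvCy t - pvCy prev| then (g + 1) :: pvLabelsOf y (g + 1) t rest
      else g :: pvLabelsOf y g t rest

def pvFinalL (y g : Int) (prev : List (String × Int)) : List (List (String × Int)) → Int
  | [] => g
  | t :: rest =>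
      if y < |pvCy t - pvCy prev| then pvFinalL y (g + 1) t rest
      else pvFinalL y g t rest

theorem pvLoopA (y : Int) : ∀ (rest : List (List (String × Int)))
    (rows : List (List (List (String × Int)))) (init : List (List (String × Int)))
    (t0 : List (String × Int)),
    (let st := rest.foldl
      (fun (acc : List (List (List (String × Int))) × List (List (String × Int))) tok =>
        if |pvCy tok - pvCy (PySem.List.pyGetD acc.2 (-1) [])| ≤ y then
          (acc.1, acc.2 ++ [tok])
        else
          (acc.1 ++ [pvSortCx acc.2], [tok]))
      (rows, init ++ [t0]);
    st.1 ++ [pvSortCx st.2]) = rows ++ (pvRunsGo y t0 (init ++ [t0]) rest).map pvSortCx := by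
  intro rest
  induction rest with
  | nil => intro rows init t0; simp [pvRunsGo]
  | cons t rest ih =>
      intro rows init t0
      simp only [List.foldl_cons, PySem.List.pyGetD_neg_one_append_singleton, pvRunsGo]
      by_cases h : |pvCy t - pvCy t0| ≤ y
      · rw [if_pos h, if_pos h]
        have := ih rows (init ++ [t0]) t
        simpa [List.append_assoc] using this
      · rw [if_neg h, if_neg h]
        have := ih (rows ++ [pvSortCx (init ++ [t0])]) [] t
        simpa [List.append_assoc] using this

theorem pvLoopB (y : Int) : ∀ (s : List (List (String × Int))) (g : Int) (acc : List Int)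
    (prev : List (String × Int)),
    s.foldl (pvStepB y) (g, acc, some prev)
    = (pvFinalL y g prev s, acc ++ pvLabelsOf y g prev s, some (s.getLastD prev)) := by
  intro s
  induction s with
  | nil => intro g acc prev; simp [pvFinalL, pvLabelsOf]
  | cons t rest ih =>
      intro g acc prev
      simp only [List.foldl_cons, List.getLastD_cons, pvFinalL, pvLabelsOf, pvStepB]
      by_cases h : y < |pvCy t - pvCy prev|
      · rw [if_pos h, if_pos h, if_pos h]
        simpa [List.append_assoc] using ih (g + 1) (acc ++ [g + 1]) t
      · rw [if_neg h, if_neg h, if_neg h]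
        simpa [List.append_assoc] using ih g (acc ++ [g]) t

theorem pvFinalL_ge (y : Int) : ∀ (s : List (List (String × Int))) (g : Int)
    (prev : List (String × Int)), g ≤ pvFinalL y g prev s := by
  intro s
  induction s with
  | nil => intro g prev; simp [pvFinalL]
  | cons t rest ih =>
      intro g prev
      simp only [pvFinalL]
      by_cases h : y < |pvCy t - pvCy prev|
      · rw [if_pos h]; have := ih (g + 1) t; omega
      · rw [if_neg h]; exact ih g t

theorem pvLabels_ge (y : Int) : ∀ (s : List (List (String × Int))) (g : Int)
    (prev : List (String × Int)) (l : Int), l ∈ pvLabelsOf y g prev s → g ≤ l := by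
  intro s
  induction s with
  | nil => intro g prev l hl; simp [pvLabelsOf] at hl
  | cons t rest ih =>
      intro g prev l hl
      simp only [pvLabelsOf] at hl
      by_cases h : y < |pvCy t - pvCy prev|
      · rw [if_pos h] at hl
        rcases List.mem_cons.mp hl with rfl | hl
        · omega
        · have := ih (g + 1) t l hl; omega
      · rw [if_neg h] at hl
        rcases List.mem_cons.mp hl with rfl | hl
        · omega
        · exact ih g t l hl

theorem pvSelect (y : Int) : ∀ (s : List (List (String × Int))) (g : Int)
    (prev : List (String × Int)) (cur : List (List (String × Int))),
    (PySem.List.pyRange g (pvFinalL y g prev s + 1) 1).map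
      (fun lab => (if lab = g then cur else []) ++
        (((pvLabelsOf y g prev s).zip s).filter (fun p => p.1 == lab)).map (fun p => p.2))
    = pvRunsGo y prev cur s := by
  intro s
  induction s with
  | nil =>
      intro g prev cur
      have h1 : PySem.List.pyRange g (g + 1) 1 = [g] := by
        rw [PySem.List.pyRange_one_cons (by omega)]
        have : PySem.List.pyRange (g + 1) (g + 1) 1 = [] := by
          apply List.eq_nil_of_length_eq_zero
          rw [PySem.List.length_pyRange_one]; omega
        rw [this]
      simp [pvFinalL, pvLabelsOf, pvRunsGo, h1]
  | cons t rest ih =>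
      intro g prev cur
      simp only [pvFinalL, pvLabelsOf, pvRunsGo]
      by_cases h : |pvCy t - pvCy prev| ≤ y
      · rw [if_neg (by omega : ¬ y < |pvCy t - pvCy prev|),
            if_neg (by omega : ¬ y < |pvCy t - pvCy prev|), if_pos h]
        rw [← ih g t (cur ++ [t])]
        apply List.map_congr_left
        intro lab _
        by_cases hl : lab = g
        · subst hl
          simp [List.zip_cons_cons, List.append_assoc]
        · have hbeq : (g == lab) = false := by simp [Ne.symm hl]
          simp [List.zip_cons_cons, hbeq, hl]
      · rw [if_pos (by omega : y < |pvCy t - pvCy prev|),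
            if_pos (by omega : y < |pvCy t - pvCy prev|), if_neg h]
        have hge : g + 1 ≤ pvFinalL y (g + 1) t rest := pvFinalL_ge y rest (g + 1) t
        rw [PySem.List.pyRange_one_cons (by omega : g < pvFinalL y (g + 1) t rest + 1)]
        simp only [List.map_cons]
        congr 1
        · -- head: row for label g is exactly cur
          have hfilt : ((pvLabelsOf y (g + 1) t rest).zip rest).filter
              (fun p => p.1 == g) = [] := by
            apply List.filter_eq_nil_iff.mpr
            intro p hp
            have hmem := List.of_mem_zip hp
            have := pvLabels_ge y rest (g + 1) t p.1 hmem.1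
            simp only [beq_iff_eq]
            omega
          have hbeq : (g + 1 == g) = false := by simp
          simp [List.zip_cons_cons, hbeq, hfilt]
        · rw [← ih (g + 1) t [t]]
          apply List.map_congr_left
          intro lab hlab
          have hmem := (PySem.List.mem_pyRange_one).mp hlab
          have hne : lab ≠ g := by omega
          by_cases hl : lab = g + 1
          · subst hl
            simp [List.zip_cons_cons, hne]
          · have hbeq : (g + 1 == lab) = false := by simp [Ne.symm hl]
            simp [List.zip_cons_cons, hbeq, hne, hl]

-- ===== VERDICT (by name: the statement is the Claim_ definition above) =====
theorem cluster_tokens_to_rows_spec : Claim_equal_cluster_tokens_to_rows := by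
  intro tokens y_thresh _hdom _hpre
  unfold Spec_cluster_tokens_to_rows
  by_cases hne : tokens = []
  · simp [cluster_tokens_to_rows, cluster_tokens_to_rows_alt, hne]
  · have hts : PySem.List.sorted tokens pvCy false ≠ [] := by
      rw [Ne, PySem.List.sorted_eq_nil_iff]; exact hne
    rcases hcase : PySem.List.sorted tokens pvCy false with _ | ⟨h, tl⟩
    · exact absurd hcase hts
    -- A side
    have hA : cluster_tokens_to_rows tokens y_thresh
        = (pvRunsGo y_thresh h [h] tl).map pvSortCx := by
      simp only [cluster_tokens_to_rows, if_neg hne, hcase,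
        PySem.List.slice_from_one, List.tail_cons, PySem.List.pyGetD_zero_cons]
      have := pvLoopA y_thresh tl [] [] h
      simpa using this
    -- B side
    have hB : cluster_tokens_to_rows_alt tokens y_thresh
        = (pvRunsGo y_thresh h [h] tl).map pvSortCx := by
      simp only [cluster_tokens_to_rows_alt, if_neg hne, hcase, List.foldl_cons]
      rw [show pvStepB y_thresh (0, [], none) h = (0, [0], some h) from rfl]
      rw [pvLoopB y_thresh tl 0 [0] h]
      simp only [List.singleton_append]
      rw [show ((0 : Int) :: pvLabelsOf y_thresh 0 h tl).zip (h :: tl)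
            = (0, h) :: (pvLabelsOf y_thresh 0 h tl).zip tl from rfl]
      rw [← pvSelect y_thresh tl 0 h [h], List.map_map]
      apply List.map_congr_left
      intro lab _
      simp only [Function.comp_apply]
      by_cases hl : lab = (0 : Int)
      · subst hl; simp
      · have hbeq : ((0 : Int) == lab) = false := by simp [Ne.symm hl]
        simp [hbeq, hl]
    rw [hA, hB]
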